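-- pv_equiv track=rewrite | github.com/Ezrastrading/Ezras-trading-ai | trading-ai/src/trading_ai/runtime/capital_truth.py | _parse_spot_base_quote
-- ===== SOURCE A (Python) =====
-- _KNOWN_QUOTE_SUFFIXES = ("USDC", "USD", "EUR", "GBP", "USDT")
--
-- def _parse_spot_base_quote(product_id: str) -> tuple[str, str]:
--     """Local copy — avoids importing ``nte.execution.routing`` (heavy side effects)."""
--     raw = (product_id or "").strip().upper()
--     if not raw or "-" not in raw:
--         return raw or "UNKNOWN", "USD"
--     for suf in _KNOWN_QUOTE_SUFFIXES:
--         if raw.endswith("-" + suf):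
--             base = raw[: -(len(suf) + 1)]
--             return base, suf
--     base, _, quote = raw.rpartition("-")
--     return base or raw, quote or "USD"
-- ===== SOURCE B (Python) =====
-- _KNOWN_QUOTE_SUFFIXES = frozenset(("USDC", "USD", "EUR", "GBP", "USDT"))
--
-- def _parse_spot_base_quote(product_id: str) -> tuple[str, str]:
--     # Single explicit right-to-left character scan with an accumulator:
--     # no separate dash-membership guard, no endswith loop, no rpartition/split call.
--     raw = (product_id or "").strip().upper()
--     quote_chars = []
--     for i in range(len(raw) - 1, -1, -1):
--         c = raw[i]
--         if c == "-":
--             base = raw[:i]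
--             quote = "".join(reversed(quote_chars))
--             if quote in _KNOWN_QUOTE_SUFFIXES:
--                 return base, quote
--             return base or raw, quote or "USD"
--         quote_chars.append(c)
--     return raw or "UNKNOWN", "USD"
-- ===== Notes on version B (the rewrite author's own statement) =====
-- stated objective: alternative
-- what changed: Replaces A's staged pipeline (dash-membership guard, a loop of endswith tests over the five candidate suffixes, then slicing/rpartition) by one explicit right-to-left character scan with an accumulator that builds the quote until the last dash is met, classifying the accumulated quote with a single set lookup; dash absence falls out of the scan itself instead of a separate membership guard.
import Mathlib
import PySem

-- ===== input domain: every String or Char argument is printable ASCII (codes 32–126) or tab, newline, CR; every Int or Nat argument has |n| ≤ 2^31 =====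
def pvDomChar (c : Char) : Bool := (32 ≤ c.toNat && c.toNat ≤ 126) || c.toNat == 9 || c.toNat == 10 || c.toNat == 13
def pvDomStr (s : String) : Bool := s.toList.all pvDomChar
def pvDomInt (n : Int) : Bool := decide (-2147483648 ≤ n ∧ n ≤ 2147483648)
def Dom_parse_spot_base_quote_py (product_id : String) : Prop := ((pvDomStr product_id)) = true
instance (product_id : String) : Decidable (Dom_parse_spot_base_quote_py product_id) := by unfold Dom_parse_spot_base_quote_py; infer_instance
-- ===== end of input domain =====

-- B replaces A's staged pipeline (dash-membership guard, endswith loop over the five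
-- candidate suffixes, slicing/rpartition) by one explicit right-to-left character scan
-- with an accumulator (objective: alternative).

def pySuffixes : List String := ["USDC", "USD", "EUR", "GBP", "USDT"]

-- ===== PORT A =====
-- Hand port of Python's `raw.rpartition("-")` core for the one-char separator:
-- returns `none` exactly when '-' is absent, else `some (base, quote)` split at the
-- LAST '-' (exact: the recursion prefers a dash found further right).
def splitLastDash : List Char → Option (List Char × List Char)
  | [] => none
  | c :: rest =>
    match splitLastDash rest with
    | some (b, q) => some (c :: b, q)
    | none => if c = '-' then some ([], rest) else none

-- `raw.rpartition("-")` (exact: ("", "", raw) when '-' is absent)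
def pyRpartitionDash (s : String) : String × String × String :=
  match splitLastDash s.toList with
  | none => ("", "", s)
  | some (b, q) => (String.ofList b, "-", String.ofList q)

-- A's `for suf in _KNOWN_QUOTE_SUFFIXES: if raw.endswith("-" + suf): return …`
def findSuffix (raw : String) : List String → Option String
  | [] => none
  | suf :: rest =>
    if PySem.Str.endswith raw ("-" ++ suf) then some suf else findSuffix raw rest

def parse_spot_base_quote_py (product_id : String) : String × String :=
  let raw := PySem.Str.upper (PySem.Str.strip product_id)
  if raw = "" ∨ PySem.Str.isIn "-" raw = false then
    (if raw = "" then "UNKNOWN" else raw, "USD")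
  else
    match findSuffix raw pySuffixes with
    | some suf => (PySem.Str.slice raw none (some (-(PySem.Str.len suf + 1))), suf)
    | none =>
      let t := pyRpartitionDash raw
      (if t.1 = "" then raw else t.1, if t.2.2 = "" then "USD" else t.2.2)

-- ===== PORT B =====
-- B's `for i in range(len(raw)-1, -1, -1)` over the characters of `raw` from the
-- right: structural recursion over `raw.toList.reverse`, `acc` = quote_chars (kept in
-- reversed order of collection = string order, as the Python's append+reversed join does); on the first '-' seen from
-- the right, `rest` holds the characters before it in reversed order (base = raw[:i]).
def scanRevB (raw : String) : List Char → List Char → String × String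
  | [], _ => (if raw = "" then "UNKNOWN" else raw, "USD")
  | c :: rest, acc =>
    if c = '-' then
      let base := String.ofList rest.reverse
      let quote := String.ofList acc
      if quote ∈ pySuffixes then (base, quote)
      else (if base = "" then raw else base, if quote = "" then "USD" else quote)
    else scanRevB raw rest (c :: acc)

def parse_spot_base_quote_py_alt (product_id : String) : String × String :=
  let raw := PySem.Str.upper (PySem.Str.strip product_id)
  scanRevB raw raw.toList.reverse []

-- ===== PRECONDITION & SPEC =====
def Spec_parse_spot_base_quote_py (product_id : String) (out : String × String) : Prop := out = parse_spot_base_quote_py_alt product_id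
instance (product_id : String) (out : String × String) : Decidable (Spec_parse_spot_base_quote_py product_id out) := by unfold Spec_parse_spot_base_quote_py; infer_instance

-- ===== CLAIM (what is proved, stated in full; the proofs are below) =====
def Claim_equal_parse_spot_base_quote_py : Prop := ∀ (product_id : String), Dom_parse_spot_base_quote_py product_id → Spec_parse_spot_base_quote_py product_id (parse_spot_base_quote_py product_id)

-- ===== LEMMAS AND PROOFS =====

theorem splitLastDash_eq_none_iff (cs : List Char) : splitLastDash cs = none ↔ '-' ∉ cs := by
  induction cs with
  | nil => simp [splitLastDash]
  | cons c rest ih =>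
    simp only [splitLastDash]
    rcases h : splitLastDash rest with _ | ⟨b, q⟩
    · have hnr := ih.mp h
      by_cases hc : c = '-' <;> simp [hc, hnr, eq_comm]
    · have hmr : '-' ∈ rest := by
        by_contra hm
        rw [ih.mpr hm] at h; cases h
      simp [hmr]

theorem splitLastDash_spec (cs b q : List Char) (h : splitLastDash cs = some (b, q)) :
    cs = b ++ '-' :: q ∧ '-' ∉ q := by
  induction cs generalizing b q with
  | nil => cases h
  | cons c rest ih =>
    simp only [splitLastDash] at h
    cases h2 : splitLastDash rest with
    | none =>
      rw [h2] at h
      by_cases hc : c = '-'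
      · simp only [if_pos hc] at h
        cases h
        exact ⟨by simp [hc], (splitLastDash_eq_none_iff rest).mp h2⟩
      · simp [hc] at h
    | some p =>
      obtain ⟨b', q'⟩ := p
      rw [h2] at h
      cases h
      obtain ⟨he, hq⟩ := ih _ _ h2
      exact ⟨by rw [he]; rfl, hq⟩

theorem suffix_dash_cancel (x y : List Char) (hy : '-' ∉ y)
    (h : ('-' :: x) <:+ ('-' :: y)) : x = y := by
  obtain ⟨u, hu⟩ := h
  cases u with
  | nil => simpa using hu
  | cons c u' =>
    simp only [List.cons_append, List.cons.injEq] at hu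
    exact absurd (by rw [← hu.2]; simp) hy

theorem dash_suffix_iff (b q suf : List Char) (hq : '-' ∉ q) (hs : '-' ∉ suf) :
    ('-' :: suf) <:+ (b ++ '-' :: q) ↔ q = suf := by
  constructor
  · intro h
    have h2 : ('-' :: q) <:+ (b ++ '-' :: q) := ⟨b, rfl⟩
    rcases List.suffix_or_suffix_of_suffix h h2 with hss | hss
    · exact (suffix_dash_cancel suf q hq hss).symm
    · exact suffix_dash_cancel q suf hs hss
  · rintro rfl
    exact ⟨b, rfl⟩

theorem endswith_char (raw suf : String) (b q : List Char)
    (hcs : raw.toList = b ++ '-' :: q) (hq : '-' ∉ q) (hs : '-' ∉ suf.toList) :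
    PySem.Str.endswith raw ("-" ++ suf) = true ↔ q = suf.toList := by
  rw [PySem.Str.endswith_eq, PySem.Chars.endswith_iff, String.toList_append, hcs]
  exact dash_suffix_iff b q suf.toList hq hs

theorem ofList_eq_lit (q : List Char) (t : String) (h : String.ofList q = t) : q = t.toList := by
  have h2 := congrArg String.toList h
  simpa using h2

theorem ofList_mem_suffixes (q : List Char) :
    String.ofList q ∈ pySuffixes ↔
      q = "USDC".toList ∨ q = "USD".toList ∨ q = "EUR".toList ∨ q = "GBP".toList ∨ q = "USDT".toList := by
  constructor
  · intro h
    simp only [pySuffixes, List.mem_cons, List.not_mem_nil, or_false] at h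
    rcases h with h | h | h | h | h
    exacts [Or.inl (ofList_eq_lit q _ h), Or.inr (Or.inl (ofList_eq_lit q _ h)),
      Or.inr (Or.inr (Or.inl (ofList_eq_lit q _ h))),
      Or.inr (Or.inr (Or.inr (Or.inl (ofList_eq_lit q _ h)))),
      Or.inr (Or.inr (Or.inr (Or.inr (ofList_eq_lit q _ h))))]
  · intro h
    rcases h with rfl | rfl | rfl | rfl | rfl <;> decide

-- the slice in A's matched branch returns exactly the prefix before the last dash
theorem slice_branch (raw : String) (b q : List Char) (k : ℕ)
    (hcs : raw.toList = b ++ '-' :: q) (hk : q.length + 1 = k) :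
    PySem.Str.slice raw none (some (-(k : Int))) = String.ofList b := by
  apply String.toList_inj.mp
  rw [PySem.Str.toList_slice, PySem.Chars.slice_eq_listSlice,
      PySem.List.slice_to_neg_natCast raw.toList k (by omega), hcs]
  have hlen : (b ++ '-' :: q).length - k = b.length := by simp; omega
  rw [hlen, List.take_left]
  simp

theorem bool_eq_false {b : Bool} {P : Prop} (h : b = true ↔ P) (hp : ¬P) : b = false := by
  cases b
  · rfl
  · exact absurd (h.mp rfl) hp

theorem matched_branch (raw suf : String) (b q : List Char)
    (hcs : raw.toList = b ++ '-' :: q) (hq : '-' ∉ q) (hqe : q = suf.toList)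
    (hmem : suf ∈ pySuffixes) :
    findSuffix raw pySuffixes = some suf ∧
      PySem.Str.slice raw none (some (-(PySem.Str.len suf + 1))) = String.ofList b := by
  have h1 := endswith_char raw "USDC" b q hcs hq (by decide)
  have h2 := endswith_char raw "USD" b q hcs hq (by decide)
  have h3 := endswith_char raw "EUR" b q hcs hq (by decide)
  have h4 := endswith_char raw "GBP" b q hcs hq (by decide)
  have h5 := endswith_char raw "USDT" b q hcs hq (by decide)
  fin_cases hmem <;> subst hqe
  · refine ⟨by simp only [findSuffix, pySuffixes, h1.mpr rfl]; simp, ?_⟩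
    rw [show (-(PySem.Str.len "USDC" + 1) : Int) = -((5 : ℕ) : Int) from by decide]
    exact slice_branch raw b _ 5 hcs (by decide)
  · refine ⟨by simp only [findSuffix, pySuffixes, bool_eq_false h1 (by decide), h2.mpr rfl]; simp, ?_⟩
    rw [show (-(PySem.Str.len "USD" + 1) : Int) = -((4 : ℕ) : Int) from by decide]
    exact slice_branch raw b _ 4 hcs (by decide)
  · refine ⟨by simp only [findSuffix, pySuffixes, bool_eq_false h1 (by decide),
      bool_eq_false h2 (by decide), h3.mpr rfl]; simp, ?_⟩
    rw [show (-(PySem.Str.len "EUR" + 1) : Int) = -((4 : ℕ) : Int) from by decide]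
    exact slice_branch raw b _ 4 hcs (by decide)
  · refine ⟨by simp only [findSuffix, pySuffixes, bool_eq_false h1 (by decide),
      bool_eq_false h2 (by decide), bool_eq_false h3 (by decide), h4.mpr rfl]; simp, ?_⟩
    rw [show (-(PySem.Str.len "GBP" + 1) : Int) = -((4 : ℕ) : Int) from by decide]
    exact slice_branch raw b _ 4 hcs (by decide)
  · refine ⟨by simp only [findSuffix, pySuffixes, bool_eq_false h1 (by decide),
      bool_eq_false h2 (by decide), bool_eq_false h3 (by decide), bool_eq_false h4 (by decide),
      h5.mpr rfl]; simp, ?_⟩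
    rw [show (-(PySem.Str.len "USDT" + 1) : Int) = -((5 : ℕ) : Int) from by decide]
    exact slice_branch raw b _ 5 hcs (by decide)

-- the scan skips a dash-free block, accumulating it (in order) onto acc
theorem scanRevB_skip (raw : String) (l : List Char) (hl : '-' ∉ l) :
    ∀ rest acc, scanRevB raw (l ++ rest) acc = scanRevB raw rest (l.reverse ++ acc) := by
  induction l with
  | nil => intro rest acc; simp
  | cons c l' ih =>
    intro rest acc
    have hc : c ≠ '-' := by intro h; exact hl (by simp [h])
    simp only [List.cons_append, scanRevB, if_neg hc]
    rw [ih (by intro h; exact hl (by simp [h])) rest (c :: acc)]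
    simp

theorem scanRevB_no_dash (raw : String) (hnd : '-' ∉ raw.toList) :
    scanRevB raw raw.toList.reverse [] = (if raw = "" then "UNKNOWN" else raw, "USD") := by
  have h := scanRevB_skip raw raw.toList.reverse (by simpa using hnd) [] []
  simpa [scanRevB] using h

theorem scanRevB_dash (raw : String) (b q : List Char)
    (hcs : raw.toList = b ++ '-' :: q) (hq : '-' ∉ q) :
    scanRevB raw raw.toList.reverse [] =
      (if String.ofList q ∈ pySuffixes then (String.ofList b, String.ofList q)
       else (if String.ofList b = "" then raw else String.ofList b,
             if String.ofList q = "" then "USD" else String.ofList q)) := by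
  have hrev : raw.toList.reverse = q.reverse ++ '-' :: b.reverse := by
    rw [hcs]; simp
  rw [hrev, scanRevB_skip raw q.reverse (by simpa using hq) ('-' :: b.reverse) []]
  simp [scanRevB]

-- A's body equals B's scan, for any raw
theorem body_eq (raw : String) :
    (if raw = "" ∨ PySem.Str.isIn "-" raw = false then
      (if raw = "" then "UNKNOWN" else raw, "USD")
    else
      match findSuffix raw pySuffixes with
      | some suf => (PySem.Str.slice raw none (some (-(PySem.Str.len suf + 1))), suf)
      | none =>
        let t := pyRpartitionDash raw
        (if t.1 = "" then raw else t.1, if t.2.2 = "" then "USD" else t.2.2)) =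
    scanRevB raw raw.toList.reverse [] := by
  by_cases hmem : '-' ∈ raw.toList
  · have hin' : PySem.Str.isIn "-" raw = true := by
      rw [PySem.Str.isIn_iff_infix]
      obtain ⟨s, t, hst⟩ := List.append_of_mem hmem
      exact ⟨s, t, by rw [hst]; simp⟩
    have hne : raw ≠ "" := by
      intro h; rw [h] at hmem; simp at hmem
    have hguard : ¬(raw = "" ∨ PySem.Str.isIn "-" raw = false) := by
      rintro (h | h)
      · exact hne h
      · rw [hin'] at h; cases h
    rw [if_neg hguard]
    obtain ⟨⟨b, q⟩, hsplit⟩ : ∃ p, splitLastDash raw.toList = some p := by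
      cases h : splitLastDash raw.toList with
      | none => exact absurd ((splitLastDash_eq_none_iff raw.toList).mp h) (by simp [hmem])
      | some p => exact ⟨p, rfl⟩
    obtain ⟨hcs, hq⟩ := splitLastDash_spec raw.toList b q hsplit
    rw [scanRevB_dash raw b q hcs hq]
    by_cases hm : String.ofList q ∈ pySuffixes
    · rw [if_pos hm]
      have hex : ∃ suf ∈ pySuffixes, q = suf.toList ∧ String.ofList q = suf := by
        rcases (ofList_mem_suffixes q).mp hm with h | h | h | h | h <;>
          exact ⟨_, by decide, h, by rw [h]; decide⟩
      obtain ⟨suf, hmemS, hqe, hofl⟩ := hex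
      obtain ⟨hfind, hslice⟩ := matched_branch raw suf b q hcs hq hqe hmemS
      rw [hfind]
      dsimp only
      rw [hslice, hofl]
    · rw [if_neg hm]
      have hno : ∀ t : String, t ∈ pySuffixes → q ≠ t.toList := by
        intro t ht he
        exact hm (by rw [he] at *; exact (ofList_mem_suffixes _).mpr (by fin_cases ht <;> simp))
      have hnone : findSuffix raw pySuffixes = none := by
        have h1 := endswith_char raw "USDC" b q hcs hq (by decide)
        have h2 := endswith_char raw "USD" b q hcs hq (by decide)
        have h3 := endswith_char raw "EUR" b q hcs hq (by decide)
        have h4 := endswith_char raw "GBP" b q hcs hq (by decide)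
        have h5 := endswith_char raw "USDT" b q hcs hq (by decide)
        simp only [findSuffix, pySuffixes]
        rw [if_neg, if_neg, if_neg, if_neg, if_neg] <;> intro hc
        · exact hno "USDT" (by decide) (h5.mp hc)
        · exact hno "GBP" (by decide) (h4.mp hc)
        · exact hno "EUR" (by decide) (h3.mp hc)
        · exact hno "USD" (by decide) (h2.mp hc)
        · exact hno "USDC" (by decide) (h1.mp hc)
      rw [hnone]
      have hrp : pyRpartitionDash raw = (String.ofList b, "-", String.ofList q) := by
        unfold pyRpartitionDash; rw [hsplit]
      rw [hrp]
  · have hnd : PySem.Str.isIn "-" raw = false := by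
      cases h : PySem.Str.isIn "-" raw
      · rfl
      · exact absurd (List.singleton_sublist.mp ((PySem.Str.isIn_iff_infix "-" raw).mp h).sublist) hmem
    rw [if_pos (Or.inr hnd), scanRevB_no_dash raw hmem]

-- ===== VERDICT (by name: the statement is the Claim_ definition above) =====
theorem parse_spot_base_quote_py_spec : Claim_equal_parse_spot_base_quote_py := by
  intro product_id _
  unfold Spec_parse_spot_base_quote_py parse_spot_base_quote_py parse_spot_base_quote_py_alt
  exact body_eq (PySem.Str.upper (PySem.Str.strip product_id))
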